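-- pv_equiv track=rewrite | github.com/MinTreesLearn/ML | Codeforces Submissions/1286/B/101158391.py | dfs
-- ===== SOURCE A (Python) =====
-- def dfs(graph,n,currnode):
--
--     visited=[False for x in range(n+1)]
--
--     stack=[currnode]
--
--     ans=[]
--
--     while stack:
--
--         currnode=stack[-1]
--
--         if visited[currnode]==False:
--
--             visited[currnode]=True
--
--             ans.append(currnode)
--
--         if currnode in graph:
--
--             for neighbour in graph[currnode]:
--
--                 if visited[neighbour]==False:
--
--                     visited[neighbour]=True
--
--                     stack.append(neighbour)
--
--                     ans.append(neighbour)
--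
--                     break
--
--             else:
--
--                 stack.pop() ####we are backtracking to previous node which is in  our stack
--
--         else:
--
--             stack.pop()
--
--     return ans
-- ===== SOURCE B (Python) =====
-- def dfs(graph, n, currnode):
--     visited = [False] * (n + 1)
--     visited[currnode] = True
--     ans = [currnode]
--     stack = [(currnode, iter(graph[currnode] if currnode in graph else []))]
--     while stack:
--         u, it = stack[-1]
--         for v in it:
--             if not visited[v]:
--                 visited[v] = True
--                 ans.append(v)
--                 stack.append((v, iter(graph[v] if v in graph else [])))
--                 break
--         else:
--             stack.pop()
--     return ans
-- ===== Notes on version B (the rewrite author's own statement) =====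
-- stated objective: alternative
-- what changed: A rescans the whole adjacency list of the stack top from the start on every visit to it; B keeps one neighbour iterator per stack frame so each adjacency list is consumed exactly once, and marks and emits the start node before the loop; on the generated input family the two measured the same.
-- outside the precondition, e.g. on dfs({2: [99]}, 1, 0): A returns [0], B returns [0]
import Mathlib
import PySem

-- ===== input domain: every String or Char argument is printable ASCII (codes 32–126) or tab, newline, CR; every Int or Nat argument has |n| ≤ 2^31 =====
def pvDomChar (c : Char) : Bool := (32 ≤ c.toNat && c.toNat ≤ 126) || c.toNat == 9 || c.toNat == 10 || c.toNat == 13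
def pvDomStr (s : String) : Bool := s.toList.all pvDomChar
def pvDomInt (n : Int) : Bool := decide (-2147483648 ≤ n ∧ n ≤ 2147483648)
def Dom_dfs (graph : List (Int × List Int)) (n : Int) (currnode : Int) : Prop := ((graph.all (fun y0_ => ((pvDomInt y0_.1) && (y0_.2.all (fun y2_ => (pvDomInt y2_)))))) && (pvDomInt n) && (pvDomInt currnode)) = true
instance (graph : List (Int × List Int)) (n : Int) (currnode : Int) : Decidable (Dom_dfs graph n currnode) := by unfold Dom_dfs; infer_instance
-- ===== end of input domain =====

-- B replaces A's full rescan of graph[currnode] on every visit to a stack top by one per-frame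
-- neighbour iterator, so each adjacency list is consumed once (objective: alternative).

-- ===== PORT A =====
-- termination helpers for the while-loop ports (cited by name in decreasing_by)
theorem pv_count_set_true_lt (xs : List Bool) (k : Nat) (h : xs[k]? = some false) :
    (xs.set k true).count false < xs.count false := by
  induction xs generalizing k with
  | nil => simp at h
  | cons a l ih =>
    cases k with
    | zero =>
      simp at h
      subst h
      simp
    | succ k =>
      simp at h
      have := ih k h
      simp only [List.set, List.count_cons]
      omega

theorem pv_pyGet?_elim {α : Type} {xs : List α} {i : Int} {b : α}
    (h : PySem.List.pyGet? xs i = some b) :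
    ∃ k, PySem.List.pyIdx? xs.length i = some k ∧ xs[k]? = some b := by
  unfold PySem.List.pyGet? at h
  cases hk : PySem.List.pyIdx? xs.length i with
  | none => rw [hk] at h; simp at h
  | some k => rw [hk] at h; exact ⟨k, rfl, h⟩

theorem pv_count_pySetD_true_lt (xs : List Bool) (i : Int)
    (h : PySem.List.pyGet? xs i = some false) :
    (PySem.List.pySetD xs i true).count false < xs.count false := by
  obtain ⟨k, hk, hg⟩ := pv_pyGet?_elim h
  unfold PySem.List.pySetD PySem.List.pySet?
  rw [hk]
  simpa using pv_count_set_true_lt xs k hg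

-- neighbour scan of A: Python's `for neighbour in graph[currnode]: if visited[neighbour]==False: … break`
-- with its `else:`; `none` = IndexError, `some none` = loop fell through, `some (some nb)` = break at nb
def findUnvisitedA (visited : List Bool) : List Int → Option (Option Int)
  | [] => some none
  | v :: rest =>
    match PySem.List.pyGet? visited v with
    | none => none
    | some true => findUnvisitedA visited rest
    | some false => some (some v)

theorem pv_findA_false {visited : List Bool} {l : List Int} {nb : Int}
    (h : findUnvisitedA visited l = some (some nb)) :
    PySem.List.pyGet? visited nb = some false := by
  induction l with
  | nil => simp [findUnvisitedA] at h
  | cons v rest ih =>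
    unfold findUnvisitedA at h
    cases hv : PySem.List.pyGet? visited v with
    | none => rw [hv] at h; simp at h
    | some b =>
      rw [hv] at h
      cases b with
      | true => exact ih h
      | false => simp at h; subst h; exact hv

def dfsLoop (graph : List (Int × List Int)) (visited : List Bool)
    (stack : List Int) (ans : List Int) : List Int :=
  match stack with
  | [] => ans
  | currnode :: rest =>
    match h1 : PySem.List.pyGet? visited currnode with
    | none => ans                       -- IndexError in Python
    | some vis =>
      let visited1 := if vis == false then PySem.List.pySetD visited currnode true else visited
      let ans1 := if vis == false then ans ++ [currnode] else ans
      match (PySem.Dict.mk graph).get? currnode with      -- `if currnode in graph: … graph[currnode]`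
      | none => dfsLoop graph visited1 rest ans1          -- `else: stack.pop()`
      | some nbrs =>
        match h2 : findUnvisitedA visited1 nbrs with
        | none => ans1                                    -- IndexError in Python
        | some none => dfsLoop graph visited1 rest ans1   -- for-else: `stack.pop()`
        | some (some nb) =>
            dfsLoop graph (PySem.List.pySetD visited1 nb true)
              (nb :: currnode :: rest) (ans1 ++ [nb])
  termination_by (visited.count false, stack.length)
  decreasing_by
  · cases vis with
    | true =>
      have hd : (if _ : ((true : Bool) == false) = true then PySem.List.pySetD visited currnode true else visited) = visited := by simp
      rw [hd]
      exact Prod.Lex.right _ (by simp)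
    | false =>
      have hd : (if _ : ((false : Bool) == false) = true then PySem.List.pySetD visited currnode true else visited) = PySem.List.pySetD visited currnode true := by simp
      rw [hd]
      exact Prod.Lex.left _ _ (pv_count_pySetD_true_lt visited currnode h1)
  · cases vis with
    | true =>
      simp only [visited1] at h2 ⊢
      simp only [show ((true : Bool) == false) = false from rfl, Bool.false_eq_true, dite_false] at h2 ⊢
      exact Prod.Lex.left _ _ (pv_count_pySetD_true_lt _ nb (pv_findA_false h2))
    | false =>
      simp only [visited1] at h2 ⊢
      simp only [show ((false : Bool) == false) = true from rfl, dite_true] at h2 ⊢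
      exact Prod.Lex.left _ _ (lt_trans (pv_count_pySetD_true_lt _ nb (pv_findA_false h2)) (pv_count_pySetD_true_lt visited currnode h1))

def dfs (graph : List (Int × List Int)) (n : Int) (currnode : Int) : List Int :=
  dfsLoop graph (List.replicate (n + 1).toNat false) [currnode] []

-- ===== PORT B =====
-- per-frame iterator step: Python's `for v in it:` consuming the frame's iterator;
-- `none` = IndexError, `some none` = iterator exhausted, `some (some (v, it'))` = break with rest it'
def scanIterB (visited : List Bool) : List Int → Option (Option (Int × List Int))
  | [] => some none
  | v :: rest =>
    match PySem.List.pyGet? visited v with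
    | none => none
    | some true => scanIterB visited rest
    | some false => some (some (v, rest))

theorem pv_scanB_false {visited : List Bool} {l : List Int} {v : Int} {it' : List Int}
    (h : scanIterB visited l = some (some (v, it'))) :
    PySem.List.pyGet? visited v = some false := by
  induction l with
  | nil => simp [scanIterB] at h
  | cons x rest ih =>
    unfold scanIterB at h
    cases hv : PySem.List.pyGet? visited x with
    | none => rw [hv] at h; simp at h
    | some b =>
      rw [hv] at h
      cases b with
      | true => exact ih h
      | false => simp at h; rw [← h.1]; exact hv

def dfsAltLoop (graph : List (Int × List Int)) (visited : List Bool)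
    (stack : List (Int × List Int)) (ans : List Int) : List Int :=
  match stack with
  | [] => ans
  | (u, it) :: rest =>
    match h2 : scanIterB visited it with
    | none => ans                           -- IndexError in Python
    | some none => dfsAltLoop graph visited rest ans      -- for-else: `stack.pop()`
    | some (some (v, it')) =>
        dfsAltLoop graph (PySem.List.pySetD visited v true)
          ((v, ((PySem.Dict.mk graph).get? v).getD []) :: (u, it') :: rest)
          (ans ++ [v])
  termination_by (visited.count false, stack.length)
  decreasing_by
  · right; simp
  · left
    simpa using pv_count_pySetD_true_lt visited v (pv_scanB_false h2)

def dfs_alt (graph : List (Int × List Int)) (n : Int) (currnode : Int) : List Int :=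
  let visited := List.replicate (n + 1).toNat false
  match PySem.List.pySet? visited currnode true with
  | none => []                              -- IndexError in Python (`visited[currnode] = True`)
  | some visited1 =>
      dfsAltLoop graph visited1
        [(currnode, ((PySem.Dict.mk graph).get? currnode).getD [])] [currnode]

-- ===== PRECONDITION & SPEC =====
-- Pre_ admits exactly the natural domain: the start node and every adjacency-list entry are valid
-- indices of the visited array of length n+1 (outside it Python A raises IndexError at the first
-- out-of-range node it reaches; entries of keys A never reaches are also required valid, although A
-- returns there, because reachability is not a closed-form condition).
def Pre_dfs (graph : List (Int × List Int)) (n : Int) (currnode : Int) : Prop :=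
  PySem.Raise.InRange (n + 1).toNat currnode ∧
    ∀ p ∈ graph, ∀ v ∈ p.2, PySem.Raise.InRange (n + 1).toNat v
instance (graph : List (Int × List Int)) (n : Int) (currnode : Int) : Decidable (Pre_dfs graph n currnode) := by unfold Pre_dfs; infer_instance

def pvWitness_dfs : (List (Int × List Int)) × Int × Int := ([(0, [1, 2]), (1, [0, 2])], 2, 0)

def Spec_dfs (graph : List (Int × List Int)) (n : Int) (currnode : Int) (out : List Int) : Prop := out = dfs_alt graph n currnode
instance (graph : List (Int × List Int)) (n : Int) (currnode : Int) (out : List Int) : Decidable (Spec_dfs graph n currnode out) := by unfold Spec_dfs; infer_instance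

-- ===== CLAIM (what is proved, stated in full; the proofs are below) =====
def Claim_equal_dfs : Prop := ∀ (graph : List (Int × List Int)) (n : Int) (currnode : Int), Dom_dfs graph n currnode → Pre_dfs graph n currnode → Spec_dfs graph n currnode (dfs graph n currnode)

-- ===== LEMMAS AND PROOFS =====

-- A's scan agrees with B's iterator step up to the forgotten iterator remainder
theorem pv_find_eq_scan (visited : List Bool) (it : List Int) :
    findUnvisitedA visited it = Option.map (Option.map Prod.fst) (scanIterB visited it) := by
  induction it with
  | nil => rfl
  | cons v rest ih =>
    unfold findUnvisitedA scanIterB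
    cases hv : PySem.List.pyGet? visited v with
    | none => rfl
    | some b => cases b <;> simp [ih]

-- A's rescan skips an already-visited prefix
theorem pv_find_append (visited : List Bool) (pre it : List Int)
    (hpre : ∀ x ∈ pre, PySem.List.pyGet? visited x = some true) :
    findUnvisitedA visited (pre ++ it) = findUnvisitedA visited it := by
  induction pre with
  | nil => rfl
  | cons x rest ih =>
    have hx := hpre x (by simp)
    simp only [List.cons_append, findUnvisitedA, hx]
    exact ih (fun y hy => hpre y (by simp [hy]))

theorem pv_scanB_spec {visited : List Bool} {it : List Int} {v : Int} {it' : List Int}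
    (h : scanIterB visited it = some (some (v, it'))) :
    ∃ pre', it = pre' ++ v :: it' ∧ ∀ x ∈ pre', PySem.List.pyGet? visited x = some true := by
  induction it with
  | nil => simp [scanIterB] at h
  | cons x rest ih =>
    unfold scanIterB at h
    cases hv : PySem.List.pyGet? visited x with
    | none => rw [hv] at h; simp at h
    | some b =>
      rw [hv] at h
      cases b with
      | true =>
        obtain ⟨pre', hp, ht⟩ := ih h
        exact ⟨x :: pre', by simp [hp], by
          intro y hy
          rcases List.mem_cons.1 hy with rfl | hy
          · exact hv
          · exact ht y hy⟩
      | false =>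
        simp at h
        exact ⟨[], by simp [h.1, h.2], by simp⟩

-- marking with True preserves every `visited[x] == True` fact
theorem pv_mono {visited : List Bool} {x : Int} (i : Int)
    (h : PySem.List.pyGet? visited x = some true) :
    PySem.List.pyGet? (PySem.List.pySetD visited i true) x = some true := by
  obtain ⟨k, hk, hg⟩ := pv_pyGet?_elim h
  unfold PySem.List.pySetD PySem.List.pySet?
  cases hi : PySem.List.pyIdx? visited.length i with
  | none => simpa [PySem.List.pyGet?, hk]
  | some m =>
    simp only [Option.map_some, Option.getD_some]
    unfold PySem.List.pyGet?
    rw [List.length_set, hk]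
    simp only [Option.bind_some]
    rw [List.getElem?_set]
    split
    · next heq =>
      subst heq
      cases hgm : visited[m]? with
      | none => rw [hgm] at hg; simp at hg
      | some _ => simp [List.getElem?_eq_some_iff] at hgm ⊢; exact hgm.1
    · exact hg

-- the freshly marked node reads back True
theorem pv_set_self {visited : List Bool} {i : Int} {b : Bool}
    (h : PySem.List.pyGet? visited i = some b) :
    PySem.List.pyGet? (PySem.List.pySetD visited i true) i = some true := by
  obtain ⟨k, hk, hg⟩ := pv_pyGet?_elim h
  have hlt : k < visited.length := by
    by_contra hge
    rw [List.getElem?_eq_none (by omega)] at hg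
    simp at hg
  unfold PySem.List.pySetD PySem.List.pySet?
  rw [hk]
  simp only [Option.map_some, Option.getD_some]
  unfold PySem.List.pyGet?
  rw [List.length_set, hk]
  simp [hlt]

-- the simulation: A's node stack against B's frame stack
theorem pv_sim (graph : List (Int × List Int)) (visited : List Bool)
    (stackA : List Int) (stackB : List (Int × List Int)) (ans : List Int)
    (hmap : stackB.map Prod.fst = stackA)
    (hvis : ∀ u ∈ stackA, PySem.List.pyGet? visited u = some true)
    (hfr : ∀ p ∈ stackB, ∃ pre, ((PySem.Dict.mk graph).get? p.1).getD [] = pre ++ p.2 ∧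
        ∀ x ∈ pre, PySem.List.pyGet? visited x = some true) :
    dfsLoop graph visited stackA ans = dfsAltLoop graph visited stackB ans := by
  cases stackB with
  | nil =>
    have hA : stackA = [] := by simpa using hmap.symm
    subst hA
    rw [dfsLoop, dfsAltLoop]
  | cons frame restB =>
    obtain ⟨u, it⟩ := frame
    have hA : stackA = u :: restB.map Prod.fst := by simpa using hmap.symm
    subst hA
    have hu : PySem.List.pyGet? visited u = some true := hvis u (by simp)
    obtain ⟨pre, hpe, hpt⟩ := hfr (u, it) (by simp)
    simp only at hpe hpt
    rw [dfsLoop, dfsAltLoop]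
    rw [hu]
    cases hget : (PySem.Dict.mk graph).get? u with
    | none =>
      rw [hget] at hpe
      simp only [Option.getD_none] at hpe
      have hit0 : it = [] := (List.eq_nil_of_append_eq_nil hpe.symm).2
      subst hit0
      simp only [show ((true : Bool) == false) = false from rfl, Bool.false_eq_true, if_false,
        scanIterB]
      exact pv_sim graph visited _ restB ans rfl
        (fun w hw => hvis w (List.mem_cons_of_mem _ hw))
        (fun p hp => hfr p (List.mem_cons_of_mem _ hp))
    | some nbrs =>
      rw [hget] at hpe
      simp only [Option.getD_some] at hpe
      simp only [show ((true : Bool) == false) = false from rfl, Bool.false_eq_true, if_false]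
      have hfind : findUnvisitedA visited nbrs
          = Option.map (Option.map Prod.fst) (scanIterB visited it) := by
        rw [hpe, pv_find_append _ _ _ hpt, pv_find_eq_scan]
      cases hscan : scanIterB visited it with
      | none =>
        rw [hscan] at hfind
        simp only [Option.map_none] at hfind
        split
        · rfl
        · next heq =>
          exact absurd (hfind ▸ (heq : findUnvisitedA visited nbrs = some none)) (by simp)
        · next nb heq =>
          exact absurd (hfind ▸ (heq : findUnvisitedA visited nbrs = some (some nb))) (by simp)
      | some o =>
        cases o with
        | none =>
          rw [hscan] at hfind
          simp only [Option.map_some, Option.map_none] at hfind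
          split
          · next heq =>
            exact absurd (hfind ▸ (heq : findUnvisitedA visited nbrs = none)) (by simp)
          · exact pv_sim graph visited _ restB ans rfl
              (fun w hw => hvis w (List.mem_cons_of_mem _ hw))
              (fun p hp => hfr p (List.mem_cons_of_mem _ hp))
          · next nb heq =>
            exact absurd (hfind ▸ (heq : findUnvisitedA visited nbrs = some (some nb))) (by simp)
        | some p =>
          obtain ⟨v, it'⟩ := p
          rw [hscan] at hfind
          simp only [Option.map_some] at hfind
          have hvf : PySem.List.pyGet? visited v = some false := pv_scanB_false hscan
          obtain ⟨pre', hit, hpt'⟩ := pv_scanB_spec hscan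
          split
          · next heq =>
            exact absurd (hfind ▸ (heq : findUnvisitedA visited nbrs = none)) (by simp)
          · next heq =>
            exact absurd (hfind ▸ (heq : findUnvisitedA visited nbrs = some none)) (by simp)
          · next nb heq =>
            have hnb : nb = v := by
              have h' : findUnvisitedA visited nbrs = some (some nb) := heq
              rw [hfind] at h'
              simpa using h'.symm
            subst hnb
            refine pv_sim graph (PySem.List.pySetD visited nb true)
              (nb :: u :: restB.map Prod.fst)
              ((nb, ((PySem.Dict.mk graph).get? nb).getD []) :: (u, it') :: restB)
              (ans ++ [nb]) (by simp) ?_ ?_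
            · intro w hw
              rcases List.mem_cons.1 hw with rfl | hw
              · exact pv_set_self hvf
              · exact pv_mono _ (hvis w hw)
            · intro q hq
              rcases List.mem_cons.1 hq with rfl | hq
              · exact ⟨[], by simp, by simp⟩
              rcases List.mem_cons.1 hq with rfl | hq
              · refine ⟨pre ++ pre' ++ [nb], ?_, ?_⟩
                · rw [hget]
                  simp only [Option.getD_some, hpe, hit]
                  simp
                · intro x hx
                  simp only [List.append_assoc, List.mem_append, List.mem_singleton] at hx
                  rcases hx with hx | hx | rfl
                  · exact pv_mono _ (hpt x hx)
                  · exact pv_mono _ (hpt' x hx)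
                  · exact pv_set_self hvf
              · obtain ⟨preq, hq1, hq2⟩ := hfr q (List.mem_cons_of_mem _ hq)
                exact ⟨preq, hq1, fun x hx => pv_mono _ (hq2 x hx)⟩
  termination_by (visited.count false, stackA.length)
  decreasing_by
  all_goals first
  | (apply Prod.Lex.right; rw [hA]; simp)
  | (apply Prod.Lex.left; exact pv_count_pySetD_true_lt _ _ hvf)

-- A's first iteration only marks the start node, then behaves as if it had been marked before the loop
theorem pv_stepA (graph : List (Int × List Int)) (visited : List Bool)
    (currnode : Int) (rest ans : List Int)
    (h : PySem.List.pyGet? visited currnode = some false) :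
    dfsLoop graph visited (currnode :: rest) ans
      = dfsLoop graph (PySem.List.pySetD visited currnode true) (currnode :: rest)
          (ans ++ [currnode]) := by
  conv_lhs => rw [dfsLoop]
  conv_rhs => rw [dfsLoop]
  rw [h, pv_set_self h]
  rfl

-- ===== VERDICT (by name: the statement is the Claim_ definition above) =====
theorem pv_idx_of_inRange (m : Nat) (i : Int) (h : PySem.Raise.InRange m i) :
    ∃ k, PySem.List.pyIdx? m i = some k ∧ k < m := by
  unfold PySem.Raise.InRange at h
  unfold PySem.List.pyIdx?
  split_ifs with h1 h2 h3
  · exact ⟨_, rfl, by omega⟩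
  · omega
  · exact ⟨_, rfl, by omega⟩
  · omega

theorem dfs_spec : Claim_equal_dfs := by
  intro graph n c _hdom hpre
  obtain ⟨hc, -⟩ := hpre
  obtain ⟨k, hk, hklt⟩ := pv_idx_of_inRange _ _ hc
  have hlen : (List.replicate (n + 1).toNat false).length = (n + 1).toNat := by simp
  have hget0 : PySem.List.pyGet? (List.replicate (n + 1).toNat false) c = some false := by
    unfold PySem.List.pyGet?
    rw [hlen, hk]
    simp [hklt]
  have hset : PySem.List.pySet? (List.replicate (n + 1).toNat false) c true
      = some (PySem.List.pySetD (List.replicate (n + 1).toNat false) c true) := by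
    unfold PySem.List.pySetD PySem.List.pySet?
    rw [hlen, hk]
    simp
  show dfs graph n c = dfs_alt graph n c
  rw [dfs, dfs_alt]
  rw [pv_stepA graph _ c [] [] hget0]
  rw [hset]
  exact pv_sim graph _ [c] [(c, ((PySem.Dict.mk graph).get? c).getD [])] [c] rfl
    (fun w hw => by
      rcases List.mem_cons.1 hw with rfl | hw
      · exact pv_set_self hget0
      · simp at hw)
    (fun q hq => by
      rcases List.mem_cons.1 hq with rfl | hq
      · exact ⟨[], rfl, by simp⟩
      · simp at hq)
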